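-- pv_equiv track=rewrite | github.com/finemateusz/haruhi-superpermutation | haruhi_coherence_kernel.py | lehmer_encode
-- ===== SOURCE A (Python) =====
-- import math
--
-- def lehmer_encode(perm):
--     lehmer = []
--     items = list(perm)
--     ref = sorted(items)
--     for i in range(len(perm)):
--         idx = ref.index(items[i])
--         lehmer.append(idx)
--         ref.pop(idx)
--     return sum(lehmer[i] * math.factorial(len(perm) - 1 - i) for i in range(len(perm)))
-- ===== SOURCE B (Python) =====
-- def lehmer_encode(perm):
--     total = 0
--     rest = list(perm)
--     while rest:
--         x = rest.pop(0)
--         total = total * (len(rest) + 1) + sum(1 for y in rest if y < x)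
--     return total
-- ===== Notes on version B (the rewrite author's own statement) =====
-- stated objective: simpler
-- what changed: Instead of sorting, repeatedly ref.index/ref.pop and a final factorial-weighted sum, B makes one left-to-right pass counting smaller elements in the remaining suffix and accumulates the factorial-base rank by Horner's rule (total = total*(len+1) + count), never calling sort or math.factorial.
import Mathlib
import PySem

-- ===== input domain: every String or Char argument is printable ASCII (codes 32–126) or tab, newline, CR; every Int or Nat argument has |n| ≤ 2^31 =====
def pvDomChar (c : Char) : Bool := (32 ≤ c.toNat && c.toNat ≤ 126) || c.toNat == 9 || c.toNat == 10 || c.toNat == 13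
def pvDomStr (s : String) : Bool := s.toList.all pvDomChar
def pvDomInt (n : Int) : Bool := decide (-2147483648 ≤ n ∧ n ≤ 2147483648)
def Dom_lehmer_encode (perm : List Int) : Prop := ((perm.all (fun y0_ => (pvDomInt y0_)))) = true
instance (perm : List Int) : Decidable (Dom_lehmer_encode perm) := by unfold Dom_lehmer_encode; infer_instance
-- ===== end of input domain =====

-- B replaces A's sort/index/pop passes and per-position math.factorial calls by one suffix-counting
-- pass with Horner accumulation of the factorial-base rank (objective: simpler).

-- ===== PORT A =====
-- the loop 'for i in range(len(perm)): idx = ref.index(items[i]); lehmer.append(idx); ref.pop(idx)',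
-- iterating over items structurally; the 'none' branches (Python ValueError / IndexError) are never
-- reached because items[i] is always a member of ref.
def lehmerLoopA : List Int → List Int → List Int
  | [], _ => []
  | x :: rest, ref =>
    match PySem.List.index? ref x with
    | none => []
    | some idx =>
      match PySem.List.pop? ref (idx : Int) with
      | none => []
      | some (_, ref') => (idx : Int) :: lehmerLoopA rest ref'

-- math.factorial is ported as Nat.factorial; its argument len(perm)-1-i is ≥ 0 for every i in range(len(perm)).
def lehmer_encode (perm : List Int) : Int :=
  let items := perm
  let ref := PySem.List.sorted items (fun x => x) false
  let lehmer := lehmerLoopA items ref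
  (PySem.List.pyRange 0 (perm.length : Int) 1).foldl
    (fun s i => s + PySem.List.pyGetD lehmer i 0 *
      (Nat.factorial ((perm.length : Int) - 1 - i).toNat : Int)) 0

-- ===== PORT B =====
-- while rest: x = rest.pop(0); total = total*(len(rest)+1) + sum(1 for y in rest if y < x)
def lehmerAltGo : List Int → Int → Int
  | [], total => total
  | x :: rest, total =>
    lehmerAltGo rest (total * ((rest.length : Int) + 1) + (rest.countP (fun y => decide (y < x)) : Int))

def lehmer_encode_alt (perm : List Int) : Int := lehmerAltGo perm 0

-- ===== PRECONDITION & SPEC =====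
def Spec_lehmer_encode (perm : List Int) (out : Int) : Prop := out = lehmer_encode_alt perm
instance (perm : List Int) (out : Int) : Decidable (Spec_lehmer_encode perm out) := by unfold Spec_lehmer_encode; infer_instance

-- ===== CLAIM (what is proved, stated in full; the proofs are below) =====
def Claim_equal_lehmer_encode : Prop := ∀ (perm : List Int), Dom_lehmer_encode perm → Spec_lehmer_encode perm (lehmer_encode perm)

-- ===== LEMMAS AND PROOFS =====

-- the Lehmer code as suffix counts: c_i = #{ j > i | perm[j] < perm[i] }
def lehmerCounts : List Int → List Int
  | [] => []
  | x :: rest => ((rest.countP (fun y => decide (y < x)) : Nat) : Int) :: lehmerCounts rest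

-- factorial-weighted sum of a code list: Σ c_i · (n-1-i)!
def wsum : List Int → Int
  | [] => 0
  | c :: L => c * (Nat.factorial L.length : Int) + wsum L

theorem length_lehmerCounts (xs : List Int) : (lehmerCounts xs).length = xs.length := by
  induction xs with
  | nil => rfl
  | cons x rest ih => simp [lehmerCounts, ih]

theorem eraseIdx_append_cons (pre suf : List Int) (x : Int) :
    (pre ++ x :: suf).eraseIdx pre.length = pre ++ suf := by
  induction pre with
  | nil => rfl
  | cons a p ihp => simpa [List.eraseIdx] using ihp

-- A's loop, run against any sorted rearrangement of xs, emits exactly the suffix counts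
theorem lehmerLoopA_eq (xs : List Int) : ∀ ref : List Int, ref.Perm xs →
    ref.Pairwise (· ≤ ·) → lehmerLoopA xs ref = lehmerCounts xs := by
  induction xs with
  | nil => intro ref _ _; rfl
  | cons x rest ih =>
    intro ref hP hS
    have hx : x ∈ ref := hP.mem_iff.mpr (List.mem_cons_self)
    obtain ⟨k, hk⟩ := Option.isSome_iff_exists.mp ((PySem.List.index?_isSome_iff ref x).mpr hx)
    obtain ⟨pre, suf, href, hlen, hxpre⟩ := (PySem.List.index?_eq_some_iff ref x k).mp hk
    have hklt : k < ref.length := by subst href; rw [← hlen]; simp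
    have hpop := PySem.List.pop?_natCast ref k hklt
    have herase : ref.eraseIdx k = pre ++ suf := by
      subst href; rw [← hlen]; exact eraseIdx_append_cons pre suf x
    -- the pairs in the sorted decomposition
    have hpair := List.pairwise_append.mp (href ▸ hS)
    -- the emitted index equals the suffix count
    have hkval : k = rest.countP (fun y => decide (y < x)) := by
      have hpre : pre.countP (fun y => decide (y < x)) = pre.length := by
        apply List.countP_eq_length.mpr
        intro a ha
        have hle : a ≤ x := hpair.2.2 a ha x (List.mem_cons_self)
        have hne : a ≠ x := fun h => hxpre (h ▸ ha)
        simpa using lt_of_le_of_ne hle hne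
      have hsuf : (x :: suf).countP (fun y => decide (y < x)) = 0 := by
        apply List.countP_eq_zero.mpr
        intro a ha
        rcases List.mem_cons.mp ha with h | h
        · simp [h]
        · have hle : x ≤ a := (List.pairwise_cons.mp hpair.2.1).1 a h
          simp; omega
      have h1 : ref.countP (fun y => decide (y < x)) = k := by
        rw [href, List.countP_append, hpre, hsuf]; omega
      have h2 : ref.countP (fun y => decide (y < x))
          = (x :: rest).countP (fun y => decide (y < x)) :=
        List.Perm.countP_congr hP fun _ => congrFun rfl
      have h3 : (x :: rest).countP (fun y => decide (y < x))
          = rest.countP (fun y => decide (y < x)) := by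
        simp
      omega
    have hP' : (ref.eraseIdx k).Perm rest := by
      rw [herase]
      have h1 : (pre ++ x :: suf).Perm (x :: (pre ++ suf)) := List.perm_middle
      have h2 : (x :: (pre ++ suf)).Perm (x :: rest) := (href ▸ h1).symm.trans hP
      exact (List.perm_cons x).mp h2
    have hS' : (ref.eraseIdx k).Pairwise (· ≤ ·) :=
      List.Pairwise.sublist (List.eraseIdx_sublist ref k) hS
    simp only [lehmerLoopA, hk, hpop, lehmerCounts]
    rw [ih _ hP' hS', hkval]

-- the indexed factorial-weighted sum over List.range is wsum
theorem sum_range_fact (L : List Int) :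
    ((List.range L.length).map
      (fun k => L.getD k 0 * (Nat.factorial (L.length - 1 - k) : Int))).sum = wsum L := by
  induction L with
  | nil => rfl
  | cons c L' ih =>
    rw [wsum, ← ih, List.length_cons, List.range_succ_eq_map, List.map_cons, List.sum_cons,
      List.map_map]
    simp only [Nat.add_sub_cancel]
    congr 1
    apply congrArg List.sum
    apply List.map_congr_left
    intro k _
    simp only [Function.comp_apply, Nat.succ_eq_add_one]
    have h2 : L'.length - (k + 1) = L'.length - 1 - k := by omega
    rw [h2, List.getD_cons_succ]

-- A's final generator sum, for any list L, equals wsum L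
theorem wsum_eq_sum (L : List Int) :
    (PySem.List.pyRange 0 (L.length : Int) 1).foldl
      (fun s i => s + PySem.List.pyGetD L i 0 *
        (Nat.factorial ((L.length : Int) - 1 - i).toNat : Int)) 0 = wsum L := by
  rw [PySem.List.foldl_add, PySem.List.pyRange_one]
  simp only [Int.sub_zero, Int.toNat_natCast, List.map_map, zero_add]
  rw [← sum_range_fact]
  congr 1
  apply List.map_congr_left
  intro k hk
  simp only [Function.comp_apply, PySem.List.pyGetD_natCast]
  have h2 : ((L.length : Int) - 1 - (k : Int)).toNat = L.length - 1 - k := by omega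
  rw [h2]

-- B's loop computes wsum of the suffix counts, Horner-style
theorem lehmerAltGo_eq (xs : List Int) : ∀ t : Int,
    lehmerAltGo xs t = t * (Nat.factorial xs.length : Int) + wsum (lehmerCounts xs) := by
  induction xs with
  | nil => intro t; simp [lehmerAltGo, wsum, lehmerCounts]
  | cons x rest ih =>
    intro t
    rw [lehmerAltGo, ih]
    simp only [lehmerCounts, wsum, length_lehmerCounts, List.length_cons, Nat.factorial_succ]
    push_cast
    ring

-- ===== VERDICT (by name: the statement is the Claim_ definition above) =====
theorem lehmer_encode_spec : Claim_equal_lehmer_encode := by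
  intro perm _
  unfold Spec_lehmer_encode lehmer_encode lehmer_encode_alt
  dsimp only
  rw [lehmerAltGo_eq, zero_mul, zero_add,
    lehmerLoopA_eq perm _ (PySem.List.sorted_perm perm (fun x => x) false)
      (PySem.List.sorted_pairwise perm (fun x => x)),
    show perm.length = (lehmerCounts perm).length from (length_lehmerCounts perm).symm,
    wsum_eq_sum]
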